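-- pv_equiv track=rewrite | github.com/NormPlum/freeCodeCamp_DailyCodingChallenges | 164.py | parse_inline_code
-- ===== SOURCE A (Python) =====
-- def parse_inline_code(markdown):
--     result = ""
--     open = False
--     for char in markdown:
--         if char == "`":
--             if open:
--                 result += "</code>"
--                 open = False
--             else:
--                 result += "<code>"
--                 open = True
--         else:
--             result += char
--     return result
-- ===== SOURCE B (Python) =====
-- def parse_inline_code(markdown):
--     parts = markdown.split('`')
--     result = parts[0]
--     for i, seg in enumerate(parts[1:]):
--         result += ('<code>' if i % 2 == 0 else '</code>') + seg
--     return result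
-- ===== Notes on version B (the rewrite author's own statement) =====
-- stated objective: idiomatic
-- what changed: Replaces the per-character scan with a boolean open/close toggle by a single str.split('`') followed by reassembly of the segments with alternating <code>/</code> tags chosen by segment parity.
import Mathlib
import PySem

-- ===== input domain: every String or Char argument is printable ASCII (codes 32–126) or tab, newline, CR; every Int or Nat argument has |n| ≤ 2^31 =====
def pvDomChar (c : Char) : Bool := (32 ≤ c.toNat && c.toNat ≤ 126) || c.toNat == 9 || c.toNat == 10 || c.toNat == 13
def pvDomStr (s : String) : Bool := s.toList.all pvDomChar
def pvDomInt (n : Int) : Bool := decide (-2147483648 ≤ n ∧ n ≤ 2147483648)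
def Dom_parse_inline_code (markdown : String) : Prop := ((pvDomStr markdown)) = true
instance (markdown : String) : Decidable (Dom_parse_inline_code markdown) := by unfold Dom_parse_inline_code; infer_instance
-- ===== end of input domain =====

-- B replaces A's per-character scan with a boolean toggle by split-on-backtick
-- then reassembly with alternating <code>/</code> tags (idiomatic decomposition).


-- ===== PORT A =====
-- the loop body of A: update (result, open) for one character
def pvStepA (st : List Char × Bool) (c : Char) : List Char × Bool :=
  if c = '`' then
    if st.2 then (st.1 ++ "</code>".toList, false)
    else (st.1 ++ "<code>".toList, true)
  else (st.1 ++ [c], st.2)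

-- literal port of A: fold over the characters with state (result, open)
def parse_inline_code (markdown : String) : String :=
  String.mk ((markdown.toList.foldl pvStepA (([] : List Char), false)).1)

-- ===== PORT B =====
-- literal port of B: split on '`', then fold over the enumerated remaining
-- segments, prepending <code> for an even index and </code> for an odd one
def parse_inline_code_alt (markdown : String) : String :=
  let parts := PySem.Chars.splitOn markdown.toList ['`']
  String.mk ((PySem.List.enumerate (parts.drop 1) 0).foldl
    (fun (acc : List Char) (p : Int × List Char) =>
      acc ++ (if PySem.Int.mod p.1 2 == 0 then "<code>".toList else "</code>".toList) ++ p.2)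
    (parts.headD []))

-- ===== PRECONDITION & SPEC =====
def Spec_parse_inline_code (markdown : String) (out : String) : Prop := out = parse_inline_code_alt markdown
instance (markdown : String) (out : String) : Decidable (Spec_parse_inline_code markdown out) := by unfold Spec_parse_inline_code; infer_instance

-- ===== CLAIM (what is proved, stated in full; the proofs are below) =====
def Claim_equal_parse_inline_code : Prop := ∀ (markdown : String), Dom_parse_inline_code markdown → Spec_parse_inline_code markdown (parse_inline_code markdown)

-- ===== LEMMAS AND PROOFS =====

-- reference: the tagged text produced from the remaining chars given the open flag
def pvTagged : List Char → Bool → List Char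
  | [], _ => []
  | c :: r, b =>
      if c = '`' then (if b then "</code>".toList else "<code>".toList) ++ pvTagged r (!b)
      else c :: pvTagged r b

-- structural splitter: pvSplit cs cur = segments of cs on '`' with pending cur
def pvSplit : List Char → List Char → List (List Char)
  | [], cur => [cur.reverse]
  | c :: r, cur => if c = '`' then cur.reverse :: pvSplit r [] else pvSplit r (c :: cur)

-- glue segments with alternating tags; ev = "this segment's tag is <code>"
def pvGlue : List (List Char) → Bool → List Char
  | [], _ => []
  | p :: ps, ev => (if ev then "<code>".toList else "</code>".toList) ++ p ++ pvGlue ps (!ev)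

theorem stepA_tick_false (res : List Char) : pvStepA (res, false) '`' = (res ++ "<code>".toList, true) := rfl
theorem stepA_tick_true (res : List Char) : pvStepA (res, true) '`' = (res ++ "</code>".toList, false) := rfl
theorem stepA_other (res : List Char) (b : Bool) (c : Char) (hc : c ≠ '`') :
    pvStepA (res, b) c = (res ++ [c], b) := by simp [pvStepA, hc]

theorem foldA_eq (cs : List Char) (res : List Char) (b : Bool) :
    (cs.foldl pvStepA (res, b)).1 = res ++ pvTagged cs b := by
  induction cs generalizing res b with
  | nil => simp [pvTagged]
  | cons c r ih =>
      rw [List.foldl_cons]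
      by_cases hc : c = '`'
      · subst hc
        cases b with
        | false => rw [stepA_tick_false, ih]; simp [pvTagged]
        | true => rw [stepA_tick_true, ih]; simp [pvTagged]
      · rw [stepA_other _ _ _ hc, ih]; simp [pvTagged, hc]

theorem go_eq (fuel : Nat) (l cur : List Char) (acc : List (List Char)) (h : l.length < fuel) :
    PySem.Chars.splitOn.go ['`'] fuel l cur acc = acc.reverse ++ pvSplit l cur := by
  induction fuel generalizing l cur acc with
  | zero => omega
  | succ fuel ih =>
      cases l with
      | nil => simp [PySem.Chars.splitOn.go, pvSplit]
      | cons c r =>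
          by_cases hc : c = '`'
          · subst hc
            rw [PySem.Chars.splitOn.go.eq_def]
            simp only [List.isPrefixOf, beq_self_eq_true, Bool.true_and,
              List.isPrefixOf_nil_left, if_true, List.length_cons, List.length_nil,
              List.drop_succ_cons, List.drop_zero]
            rw [ih r [] _ (by simp at h; omega)]
            simp [pvSplit]
          · have hpre : (['`'].isPrefixOf (c :: r)) = false := by
              simp [List.isPrefixOf]
              exact fun hh => (hc hh.symm).elim
            rw [PySem.Chars.splitOn.go.eq_def]
            simp only [hpre, Bool.false_eq_true, if_false]
            rw [ih r (c :: cur) acc (by simp at h; omega)]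
            simp [pvSplit, hc]

theorem splitOn_eq (cs : List Char) :
    PySem.Chars.splitOn cs ['`'] = pvSplit cs [] := by
  unfold PySem.Chars.splitOn
  rw [go_eq _ _ _ _ (by omega)]
  simp

theorem parity_flip (k : Int) :
    (PySem.Int.mod (k + 1) 2 == 0) = !(PySem.Int.mod k 2 == 0) := by
  have h1 : PySem.Int.mod (k + 1) 2 = (k + 1) % 2 := by
    show Int.fmod (k + 1) 2 = (k + 1) % 2
    rw [Int.fmod_eq_emod]; norm_num
  have h2 : PySem.Int.mod k 2 = k % 2 := by
    show Int.fmod k 2 = k % 2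
    rw [Int.fmod_eq_emod]; norm_num
  rw [h1, h2]
  rcases Int.emod_two_eq k with h | h
  · have h' : (k + 1) % 2 = 1 := by omega
    simp [h, h']
  · have h' : (k + 1) % 2 = 0 := by omega
    simp [h, h']

theorem foldB_eq (ps : List (List Char)) (k : Int) (acc : List Char) :
    ((PySem.List.enumerate ps k).foldl
      (fun (acc : List Char) (p : Int × List Char) =>
        acc ++ (if PySem.Int.mod p.1 2 == 0 then "<code>".toList else "</code>".toList) ++ p.2)
      acc) = acc ++ pvGlue ps (PySem.Int.mod k 2 == 0) := by
  induction ps generalizing k acc with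
  | nil => simp [PySem.List.enumerate_nil, pvGlue]
  | cons p ps ih =>
      rw [PySem.List.enumerate_cons, List.foldl_cons, ih, parity_flip]
      cases hk : (PySem.Int.mod k 2 == 0) <;> simp [pvGlue]

theorem glue_split (r cur : List Char) (ev : Bool) :
    pvGlue (pvSplit r cur) ev
      = (if ev then "<code>".toList else "</code>".toList) ++ cur.reverse ++ pvTagged r ev := by
  induction r generalizing cur ev with
  | nil => simp [pvSplit, pvGlue, pvTagged]
  | cons c r ih =>
      by_cases hc : c = '`'
      · subst hc
        simp only [pvSplit, if_true, pvGlue, ih, pvTagged]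
        cases ev <;> simp
      · simp [pvSplit, hc, ih, pvTagged]

theorem head_glue (cs : List Char) (cur : List Char) :
    (pvSplit cs cur).headD [] ++ pvGlue ((pvSplit cs cur).drop 1) true
      = cur.reverse ++ pvTagged cs false := by
  induction cs generalizing cur with
  | nil => simp [pvSplit, pvGlue, pvTagged]
  | cons c r ih =>
      by_cases hc : c = '`'
      · subst hc
        simp [pvSplit, pvTagged, glue_split]
      · simp only [pvSplit, if_neg hc]
        rw [ih]
        simp [pvTagged, hc]

-- ===== VERDICT (by name: the statement is the Claim_ definition above) =====
theorem parse_inline_code_spec : Claim_equal_parse_inline_code := by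
  intro markdown _
  unfold Spec_parse_inline_code parse_inline_code parse_inline_code_alt
  rw [foldA_eq]
  simp only [splitOn_eq]
  rw [foldB_eq]
  have h0 : (PySem.Int.mod (0 : Int) 2 == 0) = true := by decide
  rw [h0, head_glue]
  simp
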